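-- pv_equiv track=rewrite | github.com/HYKINGDOM/Python-learn | Day36/src/chrome_bookmark.py | find_duplicate_bookmarks
-- ===== SOURCE A (Python) =====
-- from typing import List, Dict, Any, Set, Tuple
--
-- def find_duplicate_bookmarks(bookmarks: List[Dict[str, str]]) -> List[List[Dict[str, str]]]:
--     """查找重复的书签"""
--     url_map = {}
--     duplicates = []
--
--     for bookmark in bookmarks:
--         url = bookmark['url']
--         if url in url_map:
--             url_map[url].append(bookmark)
--         else:
--             url_map[url] = [bookmark]
--
--     # 过滤出有重复的URL
--     for url, items in url_map.items():
--         if len(items) > 1: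
--             duplicates.append(items)
--
--     return duplicates
-- ===== SOURCE B (Python) =====
-- def find_duplicate_bookmarks(bookmarks):
--     """Count URLs first, then collect only bookmarks whose URL is duplicated."""
--     counts = {}
--     for bookmark in bookmarks:
--         u = bookmark['url']
--         counts[u] = counts.get(u, 0) + 1
--     result = {}
--     for bookmark in bookmarks:
--         u = bookmark['url']
--         if counts[u] > 1:
--             result[u] = result.get(u, []) + [bookmark]
--     return list(result.values())
-- ===== Notes on version B (the rewrite author's own statement) =====
-- stated objective: alternative
-- what changed: A groups every bookmark into a URL-keyed map and then filters groups of size > 1; B first counts URLs in one pass and then collects, in a second pass over the bookmarks, only those whose URL count exceeds 1, so no full grouping of unique URLs is ever built.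
import Mathlib
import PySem

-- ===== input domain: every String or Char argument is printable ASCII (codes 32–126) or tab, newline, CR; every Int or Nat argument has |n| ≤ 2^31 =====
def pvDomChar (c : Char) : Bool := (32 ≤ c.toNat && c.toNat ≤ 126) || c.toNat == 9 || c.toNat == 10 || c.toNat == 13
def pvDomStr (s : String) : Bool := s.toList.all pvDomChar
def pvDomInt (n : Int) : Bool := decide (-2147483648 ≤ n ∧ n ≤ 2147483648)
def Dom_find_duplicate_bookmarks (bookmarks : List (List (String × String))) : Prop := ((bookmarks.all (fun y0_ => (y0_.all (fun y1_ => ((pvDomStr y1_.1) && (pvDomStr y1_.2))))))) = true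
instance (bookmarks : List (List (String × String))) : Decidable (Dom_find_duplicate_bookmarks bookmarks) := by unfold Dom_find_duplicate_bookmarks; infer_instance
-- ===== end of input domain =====

-- B replaces A's group-everything-then-filter with a count-first pass and a second pass that
-- collects only the bookmarks whose URL is duplicated (objective: alternative decomposition, same cost).

-- bookmark['url'] : first-match lookup in the association list (Pre_ guarantees the key exists,
-- so the "" default is never consulted)
def pvUrl (b : List (String × String)) : String :=
  (((b.find? (fun p => p.1 == "url")).map (fun p => p.2)).getD "")

-- ===== PORT A =====
def find_duplicate_bookmarks (bookmarks : List (List (String × String))) : List (List (List (String × String))) :=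
  let url_map : PySem.Dict String (List (List (String × String))) :=
    bookmarks.foldl (fun m b =>
      match m.get? (pvUrl b) with
      | some items => m.insert (pvUrl b) (items ++ [b])
      | none => m.insert (pvUrl b) [b]) PySem.Dict.empty
  url_map.items.foldl (fun duplicates p => if p.2.length > 1 then duplicates ++ [p.2] else duplicates) []

-- ===== PORT B =====
def find_duplicate_bookmarks_alt (bookmarks : List (List (String × String))) : List (List (List (String × String))) :=
  let counts : PySem.Dict String Int :=
    bookmarks.foldl (fun c b => c.insert (pvUrl b) (c.getD (pvUrl b) 0 + 1)) PySem.Dict.empty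
  let result : PySem.Dict String (List (List (String × String))) :=
    bookmarks.foldl (fun r b =>
      if counts.getD (pvUrl b) 0 > 1 then r.insert (pvUrl b) (r.getD (pvUrl b) [] ++ [b]) else r)
      PySem.Dict.empty
  result.values

-- ===== PRECONDITION & SPEC =====
-- Pre_ excludes bookmarks without a 'url' key, on which Python A raises KeyError.
def Pre_find_duplicate_bookmarks (bookmarks : List (List (String × String))) : Prop :=
  ∀ b ∈ bookmarks, "url" ∈ b.map (fun p => p.1)
instance (bookmarks : List (List (String × String))) : Decidable (Pre_find_duplicate_bookmarks bookmarks) := by unfold Pre_find_duplicate_bookmarks; infer_instance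
def pvWitness_find_duplicate_bookmarks : (List (List (String × String))) :=
  [[("url", "a"), ("title", "t1")], [("url", "a"), ("title", "t2")], [("url", "b")]]

def Spec_find_duplicate_bookmarks (bookmarks : List (List (String × String))) (out : List (List (List (String × String)))) : Prop := out = find_duplicate_bookmarks_alt bookmarks
instance (bookmarks : List (List (String × String))) (out : List (List (List (String × String)))) : Decidable (Spec_find_duplicate_bookmarks bookmarks out) := by unfold Spec_find_duplicate_bookmarks; infer_instance

-- ===== CLAIM (what is proved, stated in full; the proofs are below) =====
def Claim_equal_find_duplicate_bookmarks : Prop := ∀ (bookmarks : List (List (String × String))), Dom_find_duplicate_bookmarks bookmarks → Pre_find_duplicate_bookmarks bookmarks → Spec_find_duplicate_bookmarks bookmarks (find_duplicate_bookmarks bookmarks)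

-- ===== LEMMAS AND PROOFS =====

-- A's url_map: the grouping of the input by URL, keyed in first-appearance order
theorem pv_itemsA (xs : List (List (String × String))) :
    (xs.foldl (fun m b =>
      match m.get? (pvUrl b) with
      | some items => m.insert (pvUrl b) (items ++ [b])
      | none => m.insert (pvUrl b) [b]) (PySem.Dict.empty : PySem.Dict String (List (List (String × String))))).items
    = (PySem.Set.ofList (xs.map pvUrl)).map
        (fun k => (k, xs.filter (fun x => pvUrl x == k))) := by
  induction xs using List.reverseRecOn with
  | nil => rfl
  | append_singleton l x ih =>
    simp only [List.foldl_append, List.foldl_cons, List.foldl_nil]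
    set M := l.foldl (fun m b =>
      match m.get? (pvUrl b) with
      | some items => m.insert (pvUrl b) (items ++ [b])
      | none => m.insert (pvUrl b) [b]) (PySem.Dict.empty : PySem.Dict String (List (List (String × String)))) with hM
    have hkeys : M.keys = PySem.Set.ofList (l.map pvUrl) := by
      have h0 : M.keys = M.items.map (fun p => p.1) := rfl
      rw [h0, ih, List.map_map]
      exact List.map_id' _
    have hnd : M.keys.Nodup := by rw [hkeys]; exact PySem.Set.nodup_ofList _
    have hrhs : (l ++ [x]).map pvUrl = l.map pvUrl ++ [pvUrl x] := by simp
    by_cases hmem : pvUrl x ∈ l.map pvUrl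
    · have hx : (pvUrl x, l.filter (fun y => pvUrl y == pvUrl x)) ∈ M.items := by
        rw [ih]
        exact List.mem_map_of_mem ((PySem.Set.mem_ofList _ _).mpr hmem)
      have hget : M.get? (pvUrl x) = some (l.filter (fun y => pvUrl y == pvUrl x)) :=
        PySem.Dict.get?_of_mem_items _ hx hnd
      have hcont : M.contains (pvUrl x) = true := by
        rw [PySem.Dict.contains_eq_isSome_get?, hget]; rfl
      simp only [hget]
      rw [PySem.Dict.items_insert_of_contains _ _ hcont, ih, List.map_map]
      rw [hrhs, PySem.Set.ofList_append_singleton,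
        PySem.Set.add_of_mem ((PySem.Set.mem_ofList _ _).mpr hmem)]
      apply List.map_congr_left
      intro k hk
      by_cases hkx : k = pvUrl x
      · subst hkx
        simp [List.filter_append]
      · have : (k == pvUrl x) = false := by simp [hkx]
        have hxk : (pvUrl x == k) = false := by simp [Ne.symm hkx]
        simp [Function.comp, this, List.filter_append, hxk]
    · have hget : M.get? (pvUrl x) = none := by
        rw [PySem.Dict.get?_eq_none_iff_not_mem_keys, hkeys]
        simpa [PySem.Set.mem_ofList] using hmem
      have hcont : M.contains (pvUrl x) = false := by
        rw [PySem.Dict.contains_eq_isSome_get?, hget]; rfl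
      simp only [hget]
      rw [PySem.Dict.items_insert_of_not_contains _ _ hcont, ih]
      rw [hrhs, PySem.Set.ofList_append_singleton,
        PySem.Set.add_of_not_mem (by simpa [PySem.Set.mem_ofList] using hmem),
        List.map_append]
      congr 1
      · apply List.map_congr_left
        intro k hk
        have hkx : pvUrl x ≠ k := by
          intro h; exact hmem (h ▸ (PySem.Set.mem_ofList _ _).mp hk)
        have hxk : (pvUrl x == k) = false := by simp [hkx]
        simp [List.filter_append, hxk]
      · have hnil : l.filter (fun y => pvUrl y == pvUrl x) = [] := by
          apply List.filter_eq_nil_iff.mpr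
          intro y hy
          simp only [beq_iff_eq]
          intro h; exact hmem (h ▸ List.mem_map_of_mem hy)
        simp [List.filter_append, hnil]

-- B's result dict: the same grouping restricted to URLs occurring more than once in xs
theorem pv_itemsB (xs : List (List (String × String)))
    (c : PySem.Dict String Int)
    (hc : ∀ k, c.getD k 0 = ((xs.map pvUrl).count k : Int))
    (p : List (List (String × String))) :
    (p.foldl (fun r b =>
      if c.getD (pvUrl b) 0 > 1 then r.insert (pvUrl b) (r.getD (pvUrl b) [] ++ [b]) else r)
      (PySem.Dict.empty : PySem.Dict String (List (List (String × String))))).items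
    = ((PySem.Set.ofList (p.map pvUrl)).filter
        (fun k => 1 < (xs.map pvUrl).count k)).map
        (fun k => (k, p.filter (fun x => pvUrl x == k))) := by
  induction p using List.reverseRecOn with
  | nil => rfl
  | append_singleton l x ih =>
    simp only [List.foldl_append, List.foldl_cons, List.foldl_nil]
    set R := l.foldl (fun r b =>
      if c.getD (pvUrl b) 0 > 1 then r.insert (pvUrl b) (r.getD (pvUrl b) [] ++ [b]) else r)
      (PySem.Dict.empty : PySem.Dict String (List (List (String × String)))) with hR
    have hkeys : R.keys = (PySem.Set.ofList (l.map pvUrl)).filter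
        (fun k => 1 < (xs.map pvUrl).count k) := by
      have h0 : R.keys = R.items.map (fun p => p.1) := rfl
      rw [h0, ih, List.map_map]
      exact List.map_id' _
    have hnd : R.keys.Nodup := by
      rw [hkeys]; exact (PySem.Set.nodup_ofList _).filter _
    have hrhs : (l ++ [x]).map pvUrl = l.map pvUrl ++ [pvUrl x] := by simp
    by_cases hcnt : 1 < (xs.map pvUrl).count (pvUrl x)
    · have hif : (c.getD (pvUrl x) 0 > 1) = True := by
        rw [hc]; simp only [eq_iff_iff, iff_true]; exact_mod_cast hcnt
      rw [if_pos (by rw [hc]; exact_mod_cast hcnt)]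
      by_cases hmem : pvUrl x ∈ l.map pvUrl
      · -- already collected: overwrite in place
        have hx : (pvUrl x, l.filter (fun y => pvUrl y == pvUrl x)) ∈ R.items := by
          rw [ih]
          refine List.mem_map_of_mem ?_
          rw [List.mem_filter]
          exact ⟨(PySem.Set.mem_ofList _ _).mpr hmem, by simpa using hcnt⟩
        have hget : R.get? (pvUrl x) = some (l.filter (fun y => pvUrl y == pvUrl x)) :=
          PySem.Dict.get?_of_mem_items _ hx hnd
        have hcont : R.contains (pvUrl x) = true := by
          rw [PySem.Dict.contains_eq_isSome_get?, hget]; rfl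
        have hgetD : R.getD (pvUrl x) [] = l.filter (fun y => pvUrl y == pvUrl x) :=
          PySem.Dict.getD_of_get?_eq_some _ [] hget
        rw [hgetD, PySem.Dict.items_insert_of_contains _ _ hcont, ih, List.map_map]
        rw [hrhs, PySem.Set.ofList_append_singleton,
          PySem.Set.add_of_mem ((PySem.Set.mem_ofList _ _).mpr hmem)]
        apply List.map_congr_left
        intro k hk
        by_cases hkx : k = pvUrl x
        · subst hkx
          simp [List.filter_append]
        · have : (k == pvUrl x) = false := by simp [hkx]
          have hxk : (pvUrl x == k) = false := by simp [Ne.symm hkx]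
          simp [Function.comp, this, List.filter_append, hxk]
      · -- fresh duplicate URL: appended at the end
        have hgetn : R.get? (pvUrl x) = none := by
          rw [PySem.Dict.get?_eq_none_iff_not_mem_keys, hkeys]
          rw [List.mem_filter]
          intro h
          exact hmem ((PySem.Set.mem_ofList _ _).mp h.1)
        have hcont : R.contains (pvUrl x) = false := by
          rw [PySem.Dict.contains_eq_isSome_get?, hgetn]; rfl
        have hgetD : R.getD (pvUrl x) [] = [] :=
          PySem.Dict.getD_of_get?_eq_none _ [] hgetn
        rw [hgetD, PySem.Dict.items_insert_of_not_contains _ _ hcont, ih]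
        rw [hrhs, PySem.Set.ofList_append_singleton,
          PySem.Set.add_of_not_mem (by simpa [PySem.Set.mem_ofList] using hmem),
          List.filter_append, List.map_append]
        congr 1
        · apply List.map_congr_left
          intro k hk
          have hk' := (List.mem_filter.mp hk).1
          have hkx : pvUrl x ≠ k := by
            intro h; exact hmem (h ▸ (PySem.Set.mem_ofList _ _).mp hk')
          have hxk : (pvUrl x == k) = false := by simp [hkx]
          simp [List.filter_append, hxk]
        · have hnil : l.filter (fun y => pvUrl y == pvUrl x) = [] := by
            apply List.filter_eq_nil_iff.mpr
            intro y hy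
            simp only [beq_iff_eq]
            intro h; exact hmem (h ▸ List.mem_map_of_mem hy)
          have : decide (1 < (xs.map pvUrl).count (pvUrl x)) = true := by simpa using hcnt
          simp [this, List.filter_append, hnil]
    · -- URL not duplicated in xs: B skips it, and the filter drops it
      rw [if_neg (by rw [hc]; exact_mod_cast hcnt)]
      rw [ih, hrhs, PySem.Set.ofList_append_singleton, PySem.Set.add_eq_ite]
      have hcnt' : decide (1 < (xs.map pvUrl).count (pvUrl x)) = false := by simpa using hcnt
      have hfilter : ∀ (S : List String),
          (if pvUrl x ∈ S then S else S ++ [pvUrl x]).filter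
            (fun k => 1 < (xs.map pvUrl).count k)
          = S.filter (fun k => 1 < (xs.map pvUrl).count k) := by
        intro S
        split
        · rfl
        · simp [List.filter_append, hcnt']
      rw [hfilter]
      apply List.map_congr_left
      intro k hk
      have hk2 := (List.mem_filter.mp hk).2
      have hkx : pvUrl x ≠ k := by
        intro h
        rw [← h] at hk2
        simp only [decide_eq_true_eq] at hk2
        exact hcnt hk2
      have hxk : (pvUrl x == k) = false := by simp [hkx]
      simp [List.filter_append, hxk]

-- the second loop of A is append-if = filter-then-map
theorem pv_dups_loop (l : List (String × List (List (String × String)))) :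
    l.foldl (fun duplicates p => if p.2.length > 1 then duplicates ++ [p.2] else duplicates) []
      = (l.filter (fun p => p.2.length > 1)).map (fun p => p.2) := by
  simpa using PySem.List.foldl_append_if (fun p => decide (p.2.length > 1)) (fun p => p.2) l []

-- ===== VERDICT (by name: the statement is the Claim_ definition above) =====
theorem find_duplicate_bookmarks_spec : Claim_equal_find_duplicate_bookmarks := by
  unfold Claim_equal_find_duplicate_bookmarks
  intro bookmarks _ _
  unfold Spec_find_duplicate_bookmarks
  unfold find_duplicate_bookmarks find_duplicate_bookmarks_alt
  have hcounts : ∀ k,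
      (bookmarks.foldl (fun c b => c.insert (pvUrl b) (c.getD (pvUrl b) 0 + 1))
        (PySem.Dict.empty : PySem.Dict String Int)).getD k 0
      = ((bookmarks.map pvUrl).count k : Int) := by
    intro k
    rw [← List.foldl_map (f := pvUrl) (g := fun c u => PySem.Dict.insert c u (c.getD u 0 + 1))
      (l := bookmarks) (init := (PySem.Dict.empty : PySem.Dict String Int))]
    rw [PySem.Dict.foldl_insert_getD_add_one_eq_counter]
    exact PySem.Dict.getD_counter _ _
  simp only []
  rw [pv_itemsA bookmarks, pv_dups_loop]
  have hvals : ∀ (d : PySem.Dict String (List (List (String × String)))),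
      d.values = d.items.map (fun p => p.2) := fun _ => rfl
  rw [hvals]
  rw [pv_itemsB bookmarks _ hcounts bookmarks]
  rw [List.filter_map, List.map_map, List.map_map]
  congr 1
  apply List.filter_congr
  intro k hk
  simp only [Function.comp, decide_eq_decide]
  rw [List.count_eq_countP, List.countP_map, ← List.countP_eq_length_filter]
  exact Iff.rfl
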